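-- pv_equiv track=rewrite | github.com/barth010may/AdventOfCode | AdventOfCode2023/Day7/part2.py | x_pair
-- ===== SOURCE A (Python) =====
-- def x_pair(cards, x):
--     counter = 0
--     list = []
--     j_is_used = False
--     for card in cards:
--         if cards.count(card) == 2 and card not in list:
--             counter += 1
--             list.append(card)
--         elif cards.count(card) + cards.count("J") == 2 and not j_is_used and card not in list:
--             counter += 1
--             list.append(card)
--             j_is_used = True
--
--     if counter == x:
--         return True
--     else:
--         return False
-- ===== SOURCE B (Python) =====
-- def x_pair(cards, x):
--     freq = {}
--     for c in cards:
--         freq[c] = freq.get(c, 0) + 1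
--     pairs = 0
--     for v in freq.values():
--         if v == 2:
--             pairs += 1
--     if freq.get("J", 0) == 1:
--         pairs += 1
--     return pairs == x
-- ===== Notes on version B (the rewrite author's own statement) =====
-- stated objective: faster
-- what changed: Replaces the per-card quadratic str.count scans with the order-dependent j_is_used flag and seen-list by a single frequency table built in one pass, counting values equal to 2 and adding 1 exactly when there is a single Joker.
import Mathlib
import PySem

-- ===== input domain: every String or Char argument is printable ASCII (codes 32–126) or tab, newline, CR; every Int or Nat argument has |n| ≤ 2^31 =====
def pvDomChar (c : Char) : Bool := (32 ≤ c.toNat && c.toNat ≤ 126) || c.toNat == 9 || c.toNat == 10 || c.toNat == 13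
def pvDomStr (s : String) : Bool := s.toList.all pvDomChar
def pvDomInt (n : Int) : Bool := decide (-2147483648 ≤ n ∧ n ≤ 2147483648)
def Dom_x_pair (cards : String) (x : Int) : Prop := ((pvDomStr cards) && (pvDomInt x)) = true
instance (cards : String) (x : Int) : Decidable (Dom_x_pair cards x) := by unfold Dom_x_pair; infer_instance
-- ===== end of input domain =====

-- B replaces A's quadratic per-card str.count scans (with a seen-list and a j_is_used flag)
-- by one frequency table built in a single pass; a timing run reported it faster.

-- ===== PORT A =====
-- one loop step of A: the if/elif over (counter, list, j_is_used)
def aStep (cs : List Char) (st : Int × List Char × Bool) (card : Char) : Int × List Char × Bool :=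
  if PySem.Chars.count cs [card] = 2 ∧ card ∉ st.2.1 then
    (st.1 + 1, st.2.1 ++ [card], st.2.2)
  else if PySem.Chars.count cs [card] + PySem.Chars.count cs ['J'] = 2 ∧ st.2.2 = false ∧ card ∉ st.2.1 then
    (st.1 + 1, st.2.1 ++ [card], true)
  else st

def x_pair (cards : String) (x : Int) : Bool :=
  let cs := cards.toList
  let st := cs.foldl (aStep cs) (0, [], false)
  st.1 == x

-- ===== PORT B =====
def x_pair_alt (cards : String) (x : Int) : Bool :=
  let freq := cards.toList.foldl (fun (d : PySem.Dict Char Int) c => d.insert c (d.getD c 0 + 1)) PySem.Dict.empty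
  let pairs : Int := freq.values.foldl (fun acc v => if v == 2 then acc + 1 else acc) 0
  let pairs := if freq.getD 'J' 0 = 1 then pairs + 1 else pairs
  pairs == x

-- ===== PRECONDITION & SPEC =====
def Spec_x_pair (cards : String) (x : Int) (out : Bool) : Prop := out = x_pair_alt cards x
instance (cards : String) (x : Int) (out : Bool) : Decidable (Spec_x_pair cards x out) := by unfold Spec_x_pair; infer_instance

-- ===== CLAIM (what is proved, stated in full; the proofs are below) =====
def Claim_equal_x_pair : Prop := ∀ (cards : String) (x : Int), Dom_x_pair cards x → Spec_x_pair cards x (x_pair cards x)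

-- ===== LEMMAS AND PROOFS =====

-- str.count with a single-character needle is the character count
theorem count_go_singleton (c : Char) : ∀ (l : List Char) (fuel acc : ℕ), l.length ≤ fuel →
    PySem.Chars.count.go [c] fuel l acc = acc + l.count c := by
  intro l
  induction l with
  | nil => intro fuel acc h; cases fuel <;> simp [PySem.Chars.count.go]
  | cons hd tl ih =>
    intro fuel acc h
    cases fuel with
    | zero => simp at h
    | succ f =>
      rw [PySem.Chars.count.go.eq_def]
      simp only [List.length_cons, Nat.succ_le_succ_iff] at h
      have hpre : List.isPrefixOf [c] (hd::tl) = (c == hd) := by simp [List.isPrefixOf]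
      simp only [hpre, List.count_cons, List.length_singleton, List.drop_one, List.tail_cons]
      by_cases hc : c = hd
      · rw [if_pos (by simp [hc]), ih f (acc+1) h]
        simp [hc]; omega
      · rw [if_neg (by simp [hc]), ih f acc h]
        simp [Ne.symm hc]

theorem count_singleton (c : Char) (l : List Char) : PySem.Chars.count l [c] = l.count c := by
  simp [PySem.Chars.count, count_go_singleton c l l.length 0 le_rfl]

theorem dedup_append_singleton (l : List Char) (a : Char) :
    PySem.List.dedup (l ++ [a]) = if a ∈ l then PySem.List.dedup l else PySem.List.dedup l ++ [a] := by
  have h1 : PySem.List.dedup (l ++ [a]) = PySem.Set.add (PySem.Set.ofList l) a := by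
    simp [PySem.List.dedup_eq_ofList, PySem.Set.ofList_eq_foldl, List.foldl_append]
  rw [h1, PySem.Set.add]
  by_cases h : a ∈ l <;> simp [h, PySem.List.dedup_eq_ofList, PySem.Set.mem_ofList]

-- the loop invariant of A
theorem loopA (cs : List Char) : ∀ (rest seen : List Char) (counter : Int) (lst : List Char) (j : Bool),
    cs = seen ++ rest →
    (∀ c, cs.count c = 2 → (c ∈ lst ↔ c ∈ seen)) →
    (∀ c ∈ lst, cs.count c = 2 ∨ (cs.count c = 1 ∧ j = true)) →
    (j = true ↔ (cs.count 'J' = 1 ∧ ∃ c ∈ seen, cs.count c = 1)) →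
    counter = ((PySem.List.dedup seen).countP (fun c => cs.count c == 2) : Int) + (if j = true then 1 else 0) →
    (rest.foldl (aStep cs) (counter, lst, j)).1
      = ((PySem.List.dedup cs).countP (fun c => cs.count c == 2) : Int)
        + (if cs.count 'J' = 1 then 1 else 0) := by
  intro rest
  induction rest with
  | nil =>
    intro seen counter lst j hsplit _ _ hj hcnt
    simp only [List.append_nil] at hsplit
    subst hsplit
    simp only [List.foldl_nil]
    rw [hcnt]
    congr 1
    by_cases hJ : cs.count 'J' = 1
    · have : j = true := by
        rw [hj]
        exact ⟨hJ, 'J', List.count_pos_iff.mp (by omega), hJ⟩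
      simp [this, hJ]
    · have : j = false := by
        cases j
        · rfl
        · exfalso; exact hJ (hj.mp rfl).1
      simp [this, hJ]
  | cons card rest' ih =>
    intro seen counter lst j hsplit hmem hlst hj hcnt
    have hcs : cs = (seen ++ [card]) ++ rest' := by simpa using hsplit
    have hcard_mem : card ∈ cs := by rw [hsplit]; simp
    have hcard_pos : 0 < cs.count card := List.count_pos_iff.mpr hcard_mem
    simp only [List.foldl_cons]
    by_cases h1 : cs.count card = 2 ∧ card ∉ lst
    · have hstep : aStep cs (counter, lst, j) card = (counter + 1, lst ++ [card], j) := by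
        simp only [aStep, count_singleton]
        rw [if_pos h1]
      rw [hstep]
      obtain ⟨hc2, hnl⟩ := h1
      have hns : card ∉ seen := fun hs => hnl ((hmem card hc2).mpr hs)
      apply ih (seen ++ [card]) _ _ _ hcs
      · intro c hc
        constructor
        · intro hcl
          rcases List.mem_append.mp hcl with h | h
          · exact List.mem_append.mpr (Or.inl ((hmem c hc).mp h))
          · simp at h; subst h; simp
        · intro hcl
          rcases List.mem_append.mp hcl with h | h
          · exact List.mem_append.mpr (Or.inl ((hmem c hc).mpr h))
          · simp at h; subst h; simp
      · intro c hcl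
        rcases List.mem_append.mp hcl with h | h
        · exact hlst c h
        · simp at h; subst h; exact Or.inl hc2
      · rw [hj]
        constructor
        · rintro ⟨hJ, c, hcs', hc1⟩
          exact ⟨hJ, c, List.mem_append.mpr (Or.inl hcs'), hc1⟩
        · rintro ⟨hJ, c, hcs', hc1⟩
          rcases List.mem_append.mp hcs' with h | h
          · exact ⟨hJ, c, h, hc1⟩
          · simp at h; subst h; omega
      · rw [dedup_append_singleton, if_neg hns, List.countP_append]
        have : List.countP (fun c => cs.count c == 2) [card] = 1 := by simp [hc2]
        rw [this, hcnt]
        push_cast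
        ring
    · by_cases h2 : cs.count card + cs.count 'J' = 2 ∧ j = false ∧ card ∉ lst
      · have hstep : aStep cs (counter, lst, j) card = (counter + 1, lst ++ [card], true) := by
          simp only [aStep, count_singleton]
          rw [if_neg h1, if_pos h2]
        rw [hstep]
        obtain ⟨hsum, hjf, hnl⟩ := h2
        -- derive count card = 1 ∧ count 'J' = 1
        have hc1 : cs.count card = 1 := by
          rcases Nat.lt_or_ge (cs.count card) 2 with h | h
          · omega
          · exfalso
            have hc2 : cs.count card = 2 := by omega
            exact h1 ⟨hc2, hnl⟩
        have hJ1 : cs.count 'J' = 1 := by omega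
        have hns : card ∉ seen := by
          intro hs
          -- card ∈ seen with count 1 → j = true by hj
          have : j = true := hj.mpr ⟨hJ1, card, hs, hc1⟩
          rw [hjf] at this; exact absurd this (by simp)
        apply ih (seen ++ [card]) _ _ _ hcs
        · intro c hc
          have hne : c ≠ card := fun he => by rw [he] at hc; omega
          constructor
          · intro hcl
            rcases List.mem_append.mp hcl with h | h
            · exact List.mem_append.mpr (Or.inl ((hmem c hc).mp h))
            · simp at h; exact absurd h hne
          · intro hcl
            rcases List.mem_append.mp hcl with h | h
            · exact List.mem_append.mpr (Or.inl ((hmem c hc).mpr h))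
            · simp at h; exact absurd h hne
        · intro c hcl
          rcases List.mem_append.mp hcl with h | h
          · rcases hlst c h with h' | h'
            · exact Or.inl h'
            · rw [hjf] at h'; exact absurd h'.2 (by simp)
          · simp at h; subst h; exact Or.inr ⟨hc1, rfl⟩
        · constructor
          · intro _; exact ⟨hJ1, card, by simp, hc1⟩
          · intro _; rfl
        · rw [dedup_append_singleton, if_neg hns, List.countP_append]
          have : List.countP (fun c => cs.count c == 2) [card] = 0 := by simp [hc1]
          rw [this, hcnt, hjf]
          norm_num
      · have hstep : aStep cs (counter, lst, j) card = (counter, lst, j) := by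
          simp only [aStep, count_singleton]
          rw [if_neg h1, if_neg h2]
        rw [hstep]
        apply ih (seen ++ [card]) _ _ _ hcs
        · intro c hc
          constructor
          · intro hcl
            exact List.mem_append.mpr (Or.inl ((hmem c hc).mp hcl))
          · intro hcl
            rcases List.mem_append.mp hcl with h | h
            · exact (hmem c hc).mpr h
            · simp at h; subst h
              by_contra hnl
              exact h1 ⟨hc, hnl⟩
        · exact hlst
        · rw [hj]
          constructor
          · rintro ⟨hJ, c, hcs', hc1⟩
            exact ⟨hJ, c, List.mem_append.mpr (Or.inl hcs'), hc1⟩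
          · rintro ⟨hJ, c, hcs', hc1⟩
            refine ⟨hJ, ?_⟩
            rcases List.mem_append.mp hcs' with h | h
            · exact ⟨c, h, hc1⟩
            · simp at h; rw [h] at hc1
              -- card has count 1 and countJ = 1; why was the elif not taken? j = true or card ∈ lst
              by_cases hjv : j = true
              · exact hj.mp hjv |>.2
              · have hjf : j = false := by cases j; rfl; exact absurd rfl hjv
                have : card ∈ lst := by
                  by_contra hnl
                  exact h2 ⟨by omega, hjf, hnl⟩
                rcases hlst card this with h' | h'
                · omega
                · rw [hjf] at h'; exact absurd h'.2 (by simp)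
        · rw [dedup_append_singleton]
          by_cases hs : card ∈ seen
          · rw [if_pos hs]; exact hcnt
          · rw [if_neg hs, List.countP_append]
            have hcard_ne2 : cs.count card ≠ 2 := by
              intro hc2
              have : card ∉ lst := fun hl => hs ((hmem card hc2).mp hl)
              exact h1 ⟨hc2, this⟩
            have : List.countP (fun c => cs.count c == 2) [card] = 0 := by simp [hcard_ne2]
            rw [this, hcnt]
            push_cast
            ring

theorem A_val (cs : List Char) :
    (cs.foldl (aStep cs) ((0 : Int), ([] : List Char), false)).1
      = ((PySem.List.dedup cs).countP (fun c => cs.count c == 2) : Int)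
        + (if cs.count 'J' = 1 then 1 else 0) := by
  apply loopA cs cs [] 0 [] false rfl
  · simp
  · simp
  · simp
  · simp [PySem.List.dedup]

theorem B_val (cards : String) (x : Int) :
    x_pair_alt cards x
      = ((((PySem.List.dedup cards.toList).countP (fun c => cards.toList.count c == 2) : Int)
          + (if cards.toList.count 'J' = 1 then 1 else 0)) == x) := by
  unfold x_pair_alt
  simp only [PySem.Dict.foldl_insert_getD_add_one_eq_counter]
  rw [PySem.List.foldl_beq_add_one]
  simp only [PySem.Dict.getD_counter]
  have hv : (PySem.Dict.counter cards.toList).values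
      = (PySem.Set.ofList cards.toList).map (fun k => (cards.toList.count k : Int)) := by
    simp [PySem.Dict.values, PySem.Dict.items_counter]
  rw [hv]
  have hc : List.count (2 : Int) ((PySem.Set.ofList cards.toList).map (fun k => (cards.toList.count k : Int)))
      = (PySem.List.dedup cards.toList).countP (fun c => cards.toList.count c == 2) := by
    rw [List.count_eq_countP, List.countP_map]
    simp only [PySem.List.dedup_eq_ofList]
    apply List.countP_congr
    intro c _
    simp [beq_iff_eq]
    omega
  rw [hc]
  by_cases hJ : cards.toList.count 'J' = 1
  · simp [hJ]
  · have : ((cards.toList.count 'J' : Int)) ≠ 1 := by exact_mod_cast hJ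
    simp [hJ, this]

-- ===== VERDICT (by name: the statement is the Claim_ definition above) =====
theorem x_pair_spec : Claim_equal_x_pair := by
  intro cards x _
  unfold Spec_x_pair
  rw [B_val cards x]
  simp only [x_pair, A_val]
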